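-- pv_equiv track=rewrite | github.com/sushmithakongi/MITS-Daily-Work | February_2023/23-02-2023/2.py | solve
-- ===== SOURCE A (Python) =====
-- def solve(a,b):
--     if a == b :
--         return 0
--     c1 = c2 = 0
--     for i in range( 28 ) :
--         if (a>>i)&1 == 1 and (b>>i&1) == 0 :
--             c1 = 1
--         if (a>>i)&1 == 0 and (b>>i)&1 == 1 :
--             c2 = 1
--     if c1 == c2 == 1 : return 2
--     return 1
-- ===== SOURCE B (Python) =====
-- def solve(a, b):
--     if a == b:
--         return 0
--     mask = (1 << 28) - 1
--     c1 = 1 if (a & ~b & mask) else 0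
--     c2 = 1 if (~a & b & mask) else 0
--     return 2 if c1 == c2 == 1 else 1
-- ===== Notes on version B (the rewrite author's own statement) =====
-- stated objective: simpler
-- what changed: Replaces the 28-iteration per-bit scan that sets c1/c2 flags with a single closed-form bitmask computation: c1 = (a & ~b & mask) != 0 and c2 = (~a & b & mask) != 0 with mask = (1<<28)-1.
import Mathlib
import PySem

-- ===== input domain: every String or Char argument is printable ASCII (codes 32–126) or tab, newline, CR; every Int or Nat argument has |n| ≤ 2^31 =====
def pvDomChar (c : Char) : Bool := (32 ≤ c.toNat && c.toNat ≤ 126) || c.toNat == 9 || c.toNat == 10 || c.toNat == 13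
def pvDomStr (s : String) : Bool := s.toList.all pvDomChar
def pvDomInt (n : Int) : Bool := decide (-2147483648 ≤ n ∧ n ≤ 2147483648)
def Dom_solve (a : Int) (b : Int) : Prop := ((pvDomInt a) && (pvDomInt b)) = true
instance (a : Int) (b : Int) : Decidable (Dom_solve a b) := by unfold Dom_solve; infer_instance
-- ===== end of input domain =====

-- B replaces A's 28-iteration per-bit flag loop with one closed-form bitmask test (simpler).

-- ===== PORT A =====
-- one loop iteration: the two flag updates read bit i of a and b
def solveStep (a : Int) (b : Int) (s : Int × Int) (i : Int) : Int × Int :=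
  -- i comes from range(28), so i ≥ 0 and Python's `a >> i` is exactly `a >>> i.toNat`
  let c1 : Int := if PySem.Int.band (a >>> i.toNat) 1 = 1 ∧ PySem.Int.band (b >>> i.toNat) 1 = 0 then 1 else s.1
  let c2 : Int := if PySem.Int.band (a >>> i.toNat) 1 = 0 ∧ PySem.Int.band (b >>> i.toNat) 1 = 1 then 1 else s.2
  (c1, c2)

def solve (a : Int) (b : Int) : Int :=
  if a = b then 0
  else
    let s := (PySem.List.pyRange 0 28 1).foldl (solveStep a b) (0, 0)
    if s.1 = 1 ∧ s.2 = 1 then 2 else 1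

-- ===== PORT B =====
def solve_alt (a : Int) (b : Int) : Int :=
  if a = b then 0
  else
    let mask : Int := ((1 : Int) <<< (28 : Nat)) - 1
    let c1 : Int := if PySem.Int.band (PySem.Int.band a (Int.not b)) mask ≠ 0 then 1 else 0
    let c2 : Int := if PySem.Int.band (PySem.Int.band (Int.not a) b) mask ≠ 0 then 1 else 0
    if c1 = 1 ∧ c2 = 1 then 2 else 1

-- ===== PRECONDITION & SPEC =====
def Spec_solve (a : Int) (b : Int) (out : Int) : Prop := out = solve_alt a b
instance (a : Int) (b : Int) (out : Int) : Decidable (Spec_solve a b out) := by unfold Spec_solve; infer_instance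

-- ===== CLAIM (what is proved, stated in full; the proofs are below) =====
def Claim_equal_solve : Prop := ∀ (a : Int) (b : Int), Dom_solve a b → Spec_solve a b (solve a b)

-- ===== LEMMAS AND PROOFS =====

theorem nat_and_mod_two (m n : Nat) : ((m &&& n) % 2 = 1) ↔ (m % 2 = 1 ∧ n % 2 = 1) := by
  have h1 := Nat.testBit_and m n 0
  simp only [Nat.testBit_zero, ← Bool.decide_and, decide_eq_decide] at h1
  exact h1

theorem nat_sub_and_testBit (m : Nat) : ∀ (n k : Nat),
    (m - (m &&& n)).testBit k = (m.testBit k && !(n.testBit k)) := by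
  induction m using Nat.strong_induction_on with
  | _ m IH =>
    intro n k
    rcases Nat.eq_zero_or_pos m with hm | hm
    · simp [hm]
    have hiff := nat_and_mod_two m n
    have hdiv : (m &&& n) / 2 = (m / 2) &&& (n / 2) := Nat.and_div_two
    have hle : m &&& n ≤ m := Nat.and_le_left
    have hle2 : (m / 2) &&& (n / 2) ≤ m / 2 := Nat.and_le_left
    have key1 : (m - (m &&& n)) % 2 = m % 2 - (m &&& n) % 2 := by omega
    have key2 : (m - (m &&& n)) / 2 = m / 2 - ((m / 2) &&& (n / 2)) := by omega
    cases k with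
    | zero =>
      rw [Nat.testBit_zero, Nat.testBit_zero, Nat.testBit_zero, ← decide_not,
        ← Bool.decide_and, decide_eq_decide]
      omega
    | succ k =>
      rw [Nat.testBit_succ, Nat.testBit_succ, Nat.testBit_succ, key2]
      exact IH (m / 2) (by omega) (n / 2) k

theorem band_ofNat_ofNat (m n : Nat) :
    PySem.Int.band (Int.ofNat m) (Int.ofNat n) = Int.ofNat (m &&& n) := by
  simp [PySem.Int.band]

theorem band_ofNat_negSucc (m n : Nat) :
    PySem.Int.band (Int.ofNat m) (Int.negSucc n) = Int.ofNat (m - (m &&& n)) := by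
  simp [PySem.Int.band, Int.negSucc_not_nonneg]

theorem band_negSucc_ofNat (m n : Nat) :
    PySem.Int.band (Int.negSucc m) (Int.ofNat n) = Int.ofNat (n - (n &&& m)) := by
  simp [PySem.Int.band, Int.negSucc_not_nonneg]

theorem band_negSucc_negSucc (m n : Nat) :
    PySem.Int.band (Int.negSucc m) (Int.negSucc n) = Int.negSucc (m ||| n) := by
  simp [PySem.Int.band, Int.negSucc_not_nonneg]
  omega

theorem testBit_ofNat (m k : Nat) : Int.testBit (Int.ofNat m) k = m.testBit k := rfl

theorem testBit_negSucc (m k : Nat) : Int.testBit (Int.negSucc m) k = !(m.testBit k) := rfl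

theorem band_testBit (x y : Int) (k : Nat) :
    (PySem.Int.band x y).testBit k = (x.testBit k && y.testBit k) := by
  cases x with
  | ofNat m =>
    cases y with
    | ofNat n => rw [band_ofNat_ofNat]; exact Nat.testBit_and m n k
    | negSucc n =>
      rw [band_ofNat_negSucc, testBit_ofNat, testBit_ofNat, testBit_negSucc]
      exact nat_sub_and_testBit m n k
  | negSucc m =>
    cases y with
    | ofNat n =>
      rw [band_negSucc_ofNat, testBit_ofNat, testBit_ofNat, testBit_negSucc]
      rw [nat_sub_and_testBit n m k, Bool.and_comm]
    | negSucc n =>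
      rw [band_negSucc_negSucc, testBit_negSucc, testBit_negSucc, testBit_negSucc, Nat.testBit_or]
      cases m.testBit k <;> cases n.testBit k <;> rfl

theorem not_testBit (x : Int) (k : Nat) : (Int.not x).testBit k = !(x.testBit k) := by
  cases x with
  | ofNat n => rw [show Int.not (Int.ofNat n) = Int.negSucc n by simp [Int.not]]; rfl
  | negSucc n =>
    rw [show Int.not (Int.negSucc n) = Int.ofNat n by simp [Int.not], testBit_ofNat,
      testBit_negSucc, Bool.not_not]

theorem nat_ne_zero_iff_testBit (n : Nat) : n ≠ 0 ↔ ∃ i, n.testBit i = true := by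
  constructor
  · intro h
    by_contra hc
    refine h (Nat.eq_of_testBit_eq (fun i => ?_))
    cases hti : n.testBit i
    · simp
    · exact absurd ⟨i, hti⟩ hc
  · rintro ⟨i, hi⟩ rfl
    simp at hi

theorem band_shift_one (x : Int) (i : Nat) :
    PySem.Int.band (x >>> i) 1 = if x.testBit i then 1 else 0 := by
  cases x with
  | ofNat n =>
    rw [show (Int.ofNat n) >>> i = Int.ofNat (n >>> i) from rfl,
      show (1 : Int) = Int.ofNat 1 from rfl, band_ofNat_ofNat, Nat.and_one_is_mod, testBit_ofNat,
      Nat.shiftRight_eq_div_pow, Nat.testBit_eq_decide_div_mod_eq]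
    by_cases hb : n / 2 ^ i % 2 = 1
    · simp [hb]
    · have h0 : n / 2 ^ i % 2 = 0 := by omega
      simp [hb, h0]
  | negSucc n =>
    rw [show (Int.negSucc n) >>> i = Int.negSucc (n >>> i) from rfl,
      show (1 : Int) = Int.ofNat 1 from rfl, band_negSucc_ofNat, testBit_negSucc,
      Nat.and_comm, Nat.and_one_is_mod, Nat.shiftRight_eq_div_pow,
      Nat.testBit_eq_decide_div_mod_eq]
    by_cases hb : n / 2 ^ i % 2 = 1
    · simp [hb]
    · have h0 : n / 2 ^ i % 2 = 0 := by omega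
      simp [hb, h0]

theorem bit_eq_one (x : Int) (i : Nat) :
    PySem.Int.band (x >>> i) 1 = 1 ↔ x.testBit i = true := by
  rw [band_shift_one]
  by_cases h : x.testBit i <;> simp [h]

theorem bit_eq_zero (x : Int) (i : Nat) :
    PySem.Int.band (x >>> i) 1 = 0 ↔ x.testBit i = false := by
  rw [band_shift_one]
  by_cases h : x.testBit i <;> simp [h]

theorem mask_lemma (x : Int) :
    PySem.Int.band x (((1 : Int) <<< (28 : Nat)) - 1) ≠ 0 ↔ ∃ i, i < 28 ∧ x.testBit i = true := by
  have hmask : ((1 : Int) <<< (28 : Nat)) - 1 = Int.ofNat (2 ^ 28 - 1) := by decide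
  rw [hmask]
  cases x with
  | ofNat n =>
    rw [band_ofNat_ofNat]
    rw [show (Int.ofNat (n &&& (2 ^ 28 - 1)) ≠ 0) ↔ (n &&& (2 ^ 28 - 1) ≠ 0) by
      constructor <;> intro h <;> simp_all]
    rw [nat_ne_zero_iff_testBit]
    simp only [testBit_ofNat]
    constructor
    · rintro ⟨i, hi⟩
      rw [Nat.testBit_and, Nat.testBit_two_pow_sub_one, Bool.and_eq_true, decide_eq_true_eq] at hi
      exact ⟨i, hi.2, hi.1⟩
    · rintro ⟨i, hlt, hbit⟩
      exact ⟨i, by rw [Nat.testBit_and, Nat.testBit_two_pow_sub_one]; simp [hlt, hbit]⟩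
  | negSucc n =>
    rw [band_negSucc_ofNat]
    rw [show (Int.ofNat ((2 ^ 28 - 1) - ((2 ^ 28 - 1) &&& n)) ≠ 0) ↔
        ((2 ^ 28 - 1) - ((2 ^ 28 - 1) &&& n) ≠ 0) by
      constructor <;> intro h <;> simp_all]
    rw [nat_ne_zero_iff_testBit]
    simp only [testBit_negSucc]
    constructor
    · rintro ⟨i, hi⟩
      rw [nat_sub_and_testBit, Nat.testBit_two_pow_sub_one, Bool.and_eq_true, decide_eq_true_eq] at hi
      exact ⟨i, hi.1, hi.2⟩
    · rintro ⟨i, hlt, hbit⟩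
      exact ⟨i, by rw [nat_sub_and_testBit, Nat.testBit_two_pow_sub_one]; simp [hlt, hbit]⟩

theorem foldl_solveStep (a b : Int) (l : List Int) (p : Int × Int) :
    l.foldl (solveStep a b) p =
      ((if (∃ i ∈ l, PySem.Int.band (a >>> i.toNat) 1 = 1 ∧ PySem.Int.band (b >>> i.toNat) 1 = 0) then 1 else p.1),
       (if (∃ i ∈ l, PySem.Int.band (a >>> i.toNat) 1 = 0 ∧ PySem.Int.band (b >>> i.toNat) 1 = 1) then 1 else p.2)) := by
  induction l generalizing p with
  | nil => simp
  | cons x l IH =>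
    rw [List.foldl_cons, IH]
    simp only [List.mem_cons, solveStep, Prod.mk.injEq]
    constructor
    · by_cases hx : PySem.Int.band (a >>> x.toNat) 1 = 1 ∧ PySem.Int.band (b >>> x.toNat) 1 = 0 <;>
        by_cases hl : (∃ i ∈ l, PySem.Int.band (a >>> i.toNat) 1 = 1 ∧ PySem.Int.band (b >>> i.toNat) 1 = 0) <;>
        simp [hx, hl]
    · by_cases hx : PySem.Int.band (a >>> x.toNat) 1 = 0 ∧ PySem.Int.band (b >>> x.toNat) 1 = 1 <;>
        by_cases hl : (∃ i ∈ l, PySem.Int.band (a >>> i.toNat) 1 = 0 ∧ PySem.Int.band (b >>> i.toNat) 1 = 1) <;>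
        simp [hx, hl]

theorem pyRange_28 : PySem.List.pyRange 0 28 1 = (List.range 28).map Int.ofNat := by
  decide

theorem cond_one (a b : Int) :
    (∃ i ∈ PySem.List.pyRange 0 28 1,
        PySem.Int.band (a >>> i.toNat) 1 = 1 ∧ PySem.Int.band (b >>> i.toNat) 1 = 0)
      ↔ PySem.Int.band (PySem.Int.band a (Int.not b)) (((1 : Int) <<< (28 : Nat)) - 1) ≠ 0 := by
  rw [pyRange_28, mask_lemma]
  constructor
  · rintro ⟨i, hmem, h1, h0⟩
    rcases List.mem_map.mp hmem with ⟨j, hj, rfl⟩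
    rw [List.mem_range] at hj
    rw [show (Int.ofNat j).toNat = j from rfl] at h1 h0
    refine ⟨j, hj, ?_⟩
    rw [band_testBit, not_testBit, (bit_eq_one a j).mp h1, (bit_eq_zero b j).mp h0]
    rfl
  · rintro ⟨i, hlt, hbit⟩
    rw [band_testBit, not_testBit, Bool.and_eq_true, Bool.not_eq_true'] at hbit
    exact ⟨Int.ofNat i, List.mem_map.mpr ⟨i, List.mem_range.mpr hlt, rfl⟩,
      (bit_eq_one a i).mpr hbit.1, (bit_eq_zero b i).mpr hbit.2⟩

theorem cond_two (a b : Int) :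
    (∃ i ∈ PySem.List.pyRange 0 28 1,
        PySem.Int.band (a >>> i.toNat) 1 = 0 ∧ PySem.Int.band (b >>> i.toNat) 1 = 1)
      ↔ PySem.Int.band (PySem.Int.band (Int.not a) b) (((1 : Int) <<< (28 : Nat)) - 1) ≠ 0 := by
  rw [pyRange_28, mask_lemma]
  constructor
  · rintro ⟨i, hmem, h0, h1⟩
    rcases List.mem_map.mp hmem with ⟨j, hj, rfl⟩
    rw [List.mem_range] at hj
    rw [show (Int.ofNat j).toNat = j from rfl] at h1 h0
    refine ⟨j, hj, ?_⟩
    rw [band_testBit, not_testBit, (bit_eq_one b j).mp h1, (bit_eq_zero a j).mp h0]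
    rfl
  · rintro ⟨i, hlt, hbit⟩
    rw [band_testBit, not_testBit, Bool.and_eq_true, Bool.not_eq_true'] at hbit
    exact ⟨Int.ofNat i, List.mem_map.mpr ⟨i, List.mem_range.mpr hlt, rfl⟩,
      (bit_eq_zero a i).mpr hbit.1, (bit_eq_one b i).mpr hbit.2⟩

theorem main_eq (a b : Int) : solve a b = solve_alt a b := by
  unfold solve solve_alt
  by_cases hab : a = b
  · simp [hab]
  · simp only [hab, if_false, foldl_solveStep, cond_one, cond_two]

-- ===== VERDICT (by name: the statement is the Claim_ definition above) =====
theorem solve_spec : Claim_equal_solve := by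
  intro a b _
  unfold Spec_solve
  exact main_eq a b
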